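-- pv_equiv track=rewrite | github.com/Johngh17/CodingChallenges | unique_consonant_substrings.py | get_consonant_substrings
-- ===== SOURCE A (Python) =====
-- def get_consonant_substrings(base):
--
--     # To hold results while avoiding duplicates
--     substrings = set()
--
--     # We need to iterate over the entire string but also need the indices to speed things up
--     for i, char in enumerate(base):
--         # Only do something special if we encounter a vowel
--         if is_consonant(char):
--             # The problem wants single letters, too, so we'll handle that here
--             substrings.add(char)
--
--             # Check the rest of the string
--             for j, subChar in enumerate(base[i+1:]):
--                 # Any vowel encountered represents the end of a potentially unique substring
--                 if is_consonant(subChar):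
--                     # Add the substring to the results set
--                     substrings.add(base[i:i+2+j])
--
--     return sorted(list(substrings))
--
-- def is_consonant(letter: str):
--     return letter.isalpha() and letter not in "AEIOUaeiou"
-- ===== SOURCE B (Python) =====
-- def is_consonant(letter: str):
--     return letter.isalpha() and letter not in "AEIOUaeiou"
--
-- def get_consonant_substrings(base):
--     # Single left-to-right pass: grow every substring opened at an earlier
--     # consonant character by character; whenever the current character is a
--     # consonant, every open substring ends here, so record them all.
--     result = set()
--     open_subs = []  # substrings starting at each consonant seen so far
--     for ch in base:
--         open_subs = [s + ch for s in open_subs]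
--         if is_consonant(ch):
--             open_subs.append(ch)
--             result.update(open_subs)
--     return sorted(result)
-- ===== Notes on version B (the rewrite author's own statement) =====
-- stated objective: alternative
-- what changed: B makes a single left-to-right pass maintaining an accumulator of open substrings extended character by character (no index arithmetic or slicing), recording all open substrings whenever a consonant is reached, instead of A's nested scan that slices base[i:i+2+j] for every consonant pair.
import Mathlib
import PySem

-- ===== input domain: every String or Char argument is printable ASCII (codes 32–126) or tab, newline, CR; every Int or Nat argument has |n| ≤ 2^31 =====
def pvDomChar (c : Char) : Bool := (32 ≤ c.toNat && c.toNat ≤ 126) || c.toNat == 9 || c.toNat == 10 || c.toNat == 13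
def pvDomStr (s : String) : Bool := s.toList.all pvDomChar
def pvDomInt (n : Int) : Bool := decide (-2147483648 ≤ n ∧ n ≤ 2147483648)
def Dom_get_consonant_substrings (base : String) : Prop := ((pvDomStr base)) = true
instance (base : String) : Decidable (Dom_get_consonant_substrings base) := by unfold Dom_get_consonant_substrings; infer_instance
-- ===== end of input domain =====

-- B is a single pass with an accumulator of open substrings grown character by
-- character, instead of A's nested index scan with slicing (objective: alternative).

-- shared helper: Python's is_consonant(letter) for a single character
-- (for one char, `letter not in "AEIOUaeiou"` is character membership)
def pvIsConsonant (c : Char) : Bool :=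
  PySem.Chars.isalpha c && !(['A','E','I','O','U','a','e','i','o','u'].contains c)

-- ===== PORT A =====
def get_consonant_substrings (base : String) : List String :=
  let cs := base.toList
  let substrings : PySem.Set String :=
    (PySem.List.enumerate cs 0).foldl (fun s p =>
      if pvIsConsonant p.2 then
        let s1 := PySem.Set.add s (String.ofList [p.2])
        (PySem.List.enumerate (PySem.List.slice cs (some (p.1 + 1)) none) 0).foldl
          (fun t q =>
            if pvIsConsonant q.2 then
              PySem.Set.add t (String.ofList (PySem.List.slice cs (some p.1) (some (p.1 + 2 + q.1))))
            else t) s1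
      else s) PySem.Set.empty
  PySem.List.sorted substrings (fun x => x) false

-- ===== PORT B =====
-- Python strings are ported as List Char inside the loop (s + ch = list append,
-- exact for Python string concatenation), converted by String.ofList when added.
def pvBStep (st : List (List Char) × PySem.Set String) (c : Char) :
    List (List Char) × PySem.Set String :=
  let opened := st.1.map (fun s => s ++ [c])
  if pvIsConsonant c then
    let opened2 := opened ++ [[c]]
    (opened2, opened2.foldl (fun r o => PySem.Set.add r (String.ofList o)) st.2)
  else
    (opened, st.2)

def get_consonant_substrings_alt (base : String) : List String :=
  PySem.List.sorted (base.toList.foldl pvBStep ([], PySem.Set.empty)).2 (fun x => x) false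

-- ===== PRECONDITION & SPEC =====
def Spec_get_consonant_substrings (base : String) (out : List String) : Prop := out = get_consonant_substrings_alt base
instance (base : String) (out : List String) : Decidable (Spec_get_consonant_substrings base out) := by unfold Spec_get_consonant_substrings; infer_instance

-- ===== CLAIM (what is proved, stated in full; the proofs are below) =====
def Claim_equal_get_consonant_substrings : Prop := ∀ (base : String), Dom_get_consonant_substrings base → Spec_get_consonant_substrings base (get_consonant_substrings base)

-- ===== LEMMAS AND PROOFS =====

-- the common characterisation: x is a substring running from a consonant to a consonant
def GoodSub (cs : List Char) (x : String) : Prop :=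
  ∃ a b : Nat, a ≤ b ∧ b < cs.length ∧
    pvIsConsonant (cs.getD a ' ') = true ∧ pvIsConsonant (cs.getD b ' ') = true ∧
    x = String.ofList ((cs.drop a).take (b - a + 1))

-- membership through a foldl whose step adds exactly the elements described by P
theorem mem_foldl_step {α β : Type} (f : List α → β → List α) (l : List β) (P : α → β → Prop)
    (h : ∀ s b, b ∈ l → ∀ x, x ∈ f s b ↔ x ∈ s ∨ P x b) :
    ∀ (s : List α) (x : α), x ∈ l.foldl f s ↔ x ∈ s ∨ ∃ b ∈ l, P x b := by
  induction l with
  | nil => simp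
  | cons b l ih =>
    intro s x
    simp only [List.foldl_cons]
    rw [ih (fun s b' hb' x => h s b' (List.mem_cons_of_mem _ hb') x),
        h s b (List.mem_cons_self ..)]
    simp only [List.mem_cons]
    constructor
    · rintro ((hs | hp) | ⟨b', hb', hp⟩)
      · exact Or.inl hs
      · exact Or.inr ⟨b, Or.inl rfl, hp⟩
      · exact Or.inr ⟨b', Or.inr hb', hp⟩
    · rintro (hs | ⟨b', (rfl | hb'), hp⟩)
      · exact Or.inl (Or.inl hs)
      · exact Or.inl (Or.inr hp)
      · exact Or.inr ⟨b', hb', hp⟩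

theorem nodup_foldl_step {α β : Type} (f : List α → β → List α) (l : List β)
    (h : ∀ s b, List.Nodup s → List.Nodup (f s b)) :
    ∀ (s : List α), List.Nodup s → List.Nodup (l.foldl f s) := by
  induction l with
  | nil => intro s hs; simpa using hs
  | cons b l ih => intro s hs; simpa only [List.foldl_cons] using ih (f s b) (h s b hs)

theorem take_one_drop {cs : List Char} {k : Nat} (hk : k < cs.length) :
    (cs.drop k).take 1 = [cs[k]] := by
  rw [← List.getElem_cons_drop hk, List.take_succ_cons, List.take_zero]

-- membership in A's set
theorem memA (cs : List Char) (x : String) :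
    x ∈ ((PySem.List.enumerate cs 0).foldl (fun s p =>
      if pvIsConsonant p.2 then
        (PySem.List.enumerate (PySem.List.slice cs (some (p.1 + 1)) none) 0).foldl
          (fun t q =>
            if pvIsConsonant q.2 then
              PySem.Set.add t (String.ofList (PySem.List.slice cs (some p.1) (some (p.1 + 2 + q.1))))
            else t) (PySem.Set.add s (String.ofList [p.2]))
      else s) PySem.Set.empty) ↔ GoodSub cs x := by
  rw [mem_foldl_step _ _
    (fun x p => pvIsConsonant p.2 = true ∧
      (x = String.ofList [p.2] ∨
        ∃ q ∈ PySem.List.enumerate (PySem.List.slice cs (some (p.1 + 1)) none) 0,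
          pvIsConsonant q.2 = true ∧
          x = String.ofList (PySem.List.slice cs (some p.1) (some (p.1 + 2 + q.1)))))]
  · constructor
    · rintro (hx | ⟨p, hp, hcons, hrest⟩)
      · simp [PySem.Set.empty] at hx
      · rw [PySem.List.mem_enumerate_iff] at hp
        obtain ⟨k, hk, rfl⟩ := hp
        simp only [zero_add] at hcons hrest ⊢
        rcases hrest with hx | ⟨q, hq, hqc, hx⟩
        · -- single letter: a = b = k
          refine ⟨k, k, le_refl k, hk, ?_, ?_, ?_⟩
          · rw [List.getD_eq_getElem _ _ hk]; exact hcons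
          · rw [List.getD_eq_getElem _ _ hk]; exact hcons
          · rw [hx]
            congr 1
            have h1 : k - k + 1 = 1 := by omega
            rw [h1, take_one_drop hk]
        · -- a = k, b = k + 1 + j
          rw [show ((k : Int) + 1) = ((k + 1 : Nat) : Int) by push_cast; ring,
            PySem.List.slice_from_natCast, PySem.List.mem_enumerate_iff] at hq
          obtain ⟨j, hj, rfl⟩ := hq
          simp only [zero_add, List.getElem_drop] at hqc hx
          rw [List.length_drop] at hj
          have hb2 : k + 1 + j < cs.length := by omega
          refine ⟨k, k + 1 + j, by omega, hb2, ?_, ?_, ?_⟩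
          · rw [List.getD_eq_getElem _ _ hk]; exact hcons
          · rw [List.getD_eq_getElem _ _ hb2]; exact hqc
          · rw [hx,
              show ((k : Int) + 2 + (j : Int)) = ((k + 2 + j : Nat) : Int) by push_cast; ring,
              PySem.List.slice_natCast]
            congr 2
            omega
    · rintro ⟨a, b, hab, hb, hca, hcb, hx⟩
      have ha : a < cs.length := lt_of_le_of_lt hab hb
      rw [List.getD_eq_getElem _ _ ha] at hca
      rw [List.getD_eq_getElem _ _ hb] at hcb
      rcases Nat.eq_or_lt_of_le hab with rfl | hlt
      · refine Or.inr ⟨((a : Int), cs[a]), ?_, hca, Or.inl ?_⟩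
        · rw [PySem.List.mem_enumerate_iff]; exact ⟨a, ha, by simp⟩
        · rw [hx]
          congr 1
          have h1 : a - a + 1 = 1 := by omega
          rw [h1, take_one_drop ha]
      · refine Or.inr ⟨((a : Int), cs[a]), ?_, hca, Or.inr ?_⟩
        · rw [PySem.List.mem_enumerate_iff]; exact ⟨a, ha, by simp⟩
        · have hj : b - a - 1 < (cs.drop (a + 1)).length := by
            rw [List.length_drop]; omega
          refine ⟨(((b - a - 1 : Nat) : Int), (cs.drop (a + 1))[b - a - 1]'hj), ?_, ?_, ?_⟩
          · rw [show ((a : Int) + 1) = ((a + 1 : Nat) : Int) by push_cast; ring,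
              PySem.List.slice_from_natCast, PySem.List.mem_enumerate_iff]
            exact ⟨b - a - 1, hj, by simp⟩
          · show pvIsConsonant ((cs.drop (a + 1))[b - a - 1]'hj) = true
            rw [List.getElem_drop]
            have h2 : a + 1 + (b - a - 1) = b := by omega
            simp only [h2]
            exact hcb
          · show x = String.ofList (PySem.List.slice cs (some ((a : Int)))
              (some ((a : Int) + 2 + ((b - a - 1 : Nat) : Int))))
            rw [hx,
              show ((a : Int) + 2 + ((b - a - 1 : Nat) : Int)) = ((a + 2 + (b - a - 1) : Nat) : Int)
                by push_cast; ring,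
              PySem.List.slice_natCast]
            congr 2
            omega
  · -- the step hypothesis
    intro s p _ x
    split_ifs with hc
    · rw [mem_foldl_step _ _
        (fun x q => pvIsConsonant q.2 = true ∧
          x = String.ofList (PySem.List.slice cs (some p.1) (some (p.1 + 2 + q.1))))]
      · rw [PySem.Set.mem_add]
        constructor
        · rintro ((hs | rfl) | ⟨q, hq, hqc, hp⟩)
          · exact Or.inl hs
          · exact Or.inr ⟨hc, Or.inl rfl⟩
          · exact Or.inr ⟨hc, Or.inr ⟨q, hq, hqc, hp⟩⟩
        · rintro (hs | ⟨-, (rfl | ⟨q, hq, hqc, hp⟩)⟩)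
          · exact Or.inl (Or.inl hs)
          · exact Or.inl (Or.inr rfl)
          · exact Or.inr ⟨q, hq, hqc, hp⟩
      · intro t q _ y
        split_ifs with hqc
        · rw [PySem.Set.mem_add]; tauto
        · simp [hqc]
    · simp [hc]

theorem nodupA (cs : List Char) :
    List.Nodup ((PySem.List.enumerate cs 0).foldl (fun s p =>
      if pvIsConsonant p.2 then
        (PySem.List.enumerate (PySem.List.slice cs (some (p.1 + 1)) none) 0).foldl
          (fun t q =>
            if pvIsConsonant q.2 then
              PySem.Set.add t (String.ofList (PySem.List.slice cs (some p.1) (some (p.1 + 2 + q.1))))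
            else t) (PySem.Set.add s (String.ofList [p.2]))
      else s) PySem.Set.empty) := by
  refine nodup_foldl_step _ _ ?_ _ (by simp [PySem.Set.empty])
  intro s p hs
  split_ifs with hc
  · refine nodup_foldl_step _ _ ?_ _ (PySem.Set.nodup_add _ _ hs)
    intro t q ht
    split_ifs with hqc
    · exact PySem.Set.nodup_add _ _ ht
    · exact ht
  · exact hs

-- B's loop invariant: after the first n characters, the open list holds, for each
-- consonant position a < n in increasing order, the characters cs[a:n], and the
-- result set holds exactly the consonant-to-consonant substrings ending before n.
theorem bInv (cs : List Char) : ∀ n, n ≤ cs.length →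
    ((cs.take n).foldl pvBStep ([], PySem.Set.empty)).1 =
      ((List.range n).filter (fun a => pvIsConsonant (cs.getD a ' '))).map
        (fun a => (cs.drop a).take (n - a)) ∧
    List.Nodup ((cs.take n).foldl pvBStep ([], PySem.Set.empty)).2 ∧
    ∀ x, x ∈ ((cs.take n).foldl pvBStep ([], PySem.Set.empty)).2 ↔
      ∃ a b : Nat, a ≤ b ∧ b < n ∧
        pvIsConsonant (cs.getD a ' ') = true ∧ pvIsConsonant (cs.getD b ' ') = true ∧
        x = String.ofList ((cs.drop a).take (b - a + 1)) := by
  intro n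
  induction n with
  | zero => intro _; refine ⟨by simp, by simp [PySem.Set.empty], ?_⟩
            intro x; simp [PySem.Set.empty]
  | succ n ih =>
    intro hn1
    have hn : n < cs.length := hn1
    obtain ⟨hopen, hnd, hmem⟩ := ih (le_of_lt hn)
    have htake : cs.take (n + 1) = cs.take n ++ [cs[n]] := by
      rw [List.take_add_one, List.getElem?_eq_getElem hn]; rfl
    rw [htake, List.foldl_append, List.foldl_cons, List.foldl_nil]
    set st := (cs.take n).foldl pvBStep ([], PySem.Set.empty) with hst
    -- the extended open list
    have hopened : st.1.map (fun s => s ++ [cs[n]]) =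
        ((List.range n).filter (fun a => pvIsConsonant (cs.getD a ' '))).map
          (fun a => (cs.drop a).take (n + 1 - a)) := by
      rw [hopen, List.map_map]
      refine List.map_congr_left ?_
      intro a ha
      have han : a < n := by
        have := List.mem_range.mp (List.mem_of_mem_filter ha); exact this
      have hlt : n - a < (cs.drop a).length := by rw [List.length_drop]; omega
      show (cs.drop a).take (n - a) ++ [cs[n]] = (cs.drop a).take (n + 1 - a)
      have h1 : n + 1 - a = (n - a) + 1 := by omega
      rw [h1, List.take_add_one, List.getElem?_eq_getElem hlt]
      congr 1
      simp only [List.getElem_drop, Option.toList_some]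
      congr 2
      omega
    have hrange : (List.range (n + 1)).filter (fun a => pvIsConsonant (cs.getD a ' ')) =
        ((List.range n).filter (fun a => pvIsConsonant (cs.getD a ' '))) ++
          (if pvIsConsonant (cs.getD n ' ') then [n] else []) := by
      rw [List.range_succ, List.filter_append]
      congr 1
      simp [List.filter]
      split_ifs <;> simp_all
    by_cases hc : pvIsConsonant cs[n]
    · have hcD : pvIsConsonant (cs.getD n ' ') = true := by
        rw [List.getD_eq_getElem _ _ hn]; exact hc
      simp only [pvBStep, hc, if_pos]
      constructor
      · -- open list
        rw [hopened, hrange, hcD, if_pos rfl, List.map_append]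
        congr 1
        simp only [List.map_cons, List.map_nil]
        rw [show n + 1 - n = 1 by omega, take_one_drop hn]
      refine ⟨?_, ?_⟩
      · -- nodup
        refine nodup_foldl_step _ _ ?_ _ hnd
        intro r o hr
        exact PySem.Set.nodup_add _ _ hr
      · -- membership
        intro x
        rw [mem_foldl_step _ _ (fun x o => x = String.ofList o)
          (by intro r o _ y; rw [PySem.Set.mem_add]), hmem]
        constructor
        · rintro (⟨a, b, hab, hbn, hca, hcb, hx⟩ | ⟨o, ho, rfl⟩)
          · exact ⟨a, b, hab, by omega, hca, hcb, hx⟩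
          · rcases List.mem_append.mp ho with ho | ho
            · rw [hopened] at ho
              obtain ⟨a, ha, rfl⟩ := List.mem_map.mp ho
              have hca : pvIsConsonant (cs.getD a ' ') = true := (List.mem_filter.mp ha).2
              have han : a < n := List.mem_range.mp (List.mem_of_mem_filter ha)
              refine ⟨a, n, by omega, by omega, hca, hcD, ?_⟩
              congr 2
              omega
            · simp only [List.mem_singleton] at ho
              subst ho
              refine ⟨n, n, le_refl n, by omega, hcD, hcD, ?_⟩
              rw [show n - n + 1 = 1 by omega, take_one_drop hn]
        · rintro ⟨a, b, hab, hbn, hca, hcb, hx⟩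
          by_cases hbn' : b < n
          · exact Or.inl ⟨a, b, hab, hbn', hca, hcb, hx⟩
          · have hbeq : b = n := by omega
            subst hbeq
            rcases Nat.eq_or_lt_of_le hab with heq | halt
            · refine Or.inr ⟨[cs[b]'hn], List.mem_append_right _ (by simp), ?_⟩
              rw [hx, heq, show b - b + 1 = 1 by omega, take_one_drop hn]
            · refine Or.inr ⟨(cs.drop a).take (b + 1 - a), ?_, ?_⟩
              · refine List.mem_append_left _ ?_
                rw [hopened]
                refine List.mem_map.mpr ⟨a, ?_, rfl⟩
                exact List.mem_filter.mpr ⟨List.mem_range.mpr (by omega), hca⟩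
              · rw [hx]; congr 2; omega
    · have hcD : pvIsConsonant (cs.getD n ' ') = false := by
        rw [List.getD_eq_getElem _ _ hn]; exact (Bool.not_eq_true _).mp hc
      simp only [pvBStep, hc, if_neg, Bool.false_eq_true, not_false_iff]
      refine ⟨?_, hnd, ?_⟩
      · rw [hopened, hrange, hcD]
        simp
      · intro x
        rw [hmem]
        constructor
        · rintro ⟨a, b, hab, hbn, hca, hcb, hx⟩
          exact ⟨a, b, hab, by omega, hca, hcb, hx⟩
        · rintro ⟨a, b, hab, hbn, hca, hcb, hx⟩
          have hbn' : b < n := by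
            rcases Nat.lt_succ_iff_lt_or_eq.mp hbn with h | rfl
            · exact h
            · rw [hcD] at hcb; cases hcb
          exact ⟨a, b, hab, hbn', hca, hcb, hx⟩

-- ===== VERDICT (by name: the statement is the Claim_ definition above) =====
theorem get_consonant_substrings_spec : Claim_equal_get_consonant_substrings := by
  intro base _
  unfold Spec_get_consonant_substrings get_consonant_substrings get_consonant_substrings_alt
  obtain ⟨-, hnd, hmem⟩ := bInv base.toList base.toList.length (le_refl _)
  rw [List.take_length] at hnd hmem
  apply PySem.List.sorted_eq_sorted_of_perm _ _ _ (fun a b h => h)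
  rw [List.perm_ext_iff_of_nodup (nodupA base.toList) hnd]
  intro x
  rw [memA, hmem]
  exact Iff.rfl
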